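-- pv_equiv track=rewrite | github.com/yannik131/coding-competitions-archive | kickstart/2013/practice_round/moist/solution.py | solve
-- ===== SOURCE A (Python) =====
-- def solve(cards):
--     # represent the strings as tuples, makes it easy to compare
--     # i. e. (1, 1) < (1, 2)
--     scores = []
--     for card in cards:
--         scores.append(tuple(ord(char) for char in card))
--
--     n = 0 # number of operations
--     i = 0 # current index
--     while i < len(scores) - 1:
--         #if a card is not in order, find a place for it above and put it there
--         if scores[i + 1] < scores[i]:
--             value = scores[i + 1]
--             j = i
--             while j > 0 and value < scores[j]:
--                 j -= 1
--             if value > scores[j]: # missing comparison for j = 0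
--                 j += 1
--             score = scores.pop(i + 1)
--             scores.insert(j, score)
--
--             n += 1
--         i += 1
--
--     return n
-- ===== SOURCE B (Python) =====
-- def solve(cards):
--     # single pass: count cards strictly below the running maximum
--     n = 0
--     mx = None
--     for card in cards:
--         if mx is None or card >= mx:
--             mx = card
--         else:
--             n += 1
--     return n
-- ===== Notes on version B (the rewrite author's own statement) =====
-- stated objective: faster
-- what changed: Replaced the insertion-sort simulation (which repeatedly pops and re-inserts out-of-order cards, scanning backwards for the insertion point) by a single pass that tracks the running maximum and counts cards strictly below it.
import Mathlib
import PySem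

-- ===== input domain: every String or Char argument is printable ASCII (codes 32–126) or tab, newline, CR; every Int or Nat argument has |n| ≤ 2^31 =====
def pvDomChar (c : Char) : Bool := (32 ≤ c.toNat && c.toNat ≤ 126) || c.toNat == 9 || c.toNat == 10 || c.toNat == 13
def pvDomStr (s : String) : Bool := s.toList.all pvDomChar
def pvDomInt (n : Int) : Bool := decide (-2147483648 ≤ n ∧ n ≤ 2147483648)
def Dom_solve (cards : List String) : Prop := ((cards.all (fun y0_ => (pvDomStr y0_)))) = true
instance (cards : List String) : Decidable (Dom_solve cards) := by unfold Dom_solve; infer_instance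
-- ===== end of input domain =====

-- B replaces A's insertion-sort simulation by a single pass counting cards below the running maximum (faster).

-- ===== PORT A =====
-- Python tuple comparison `<` on tuples of ints (lexicographic, shorter prefix is smaller); exact.
def tupLt : List Int → List Int → Bool
  | _, [] => false
  | [], _ :: _ => true
  | a :: as, b :: bs => if a < b then true else if b < a then false else tupLt as bs

-- tuple(ord(char) for char in card): ord = codepoint; exact on Dom.
def ordTuple (s : String) : List Int := s.toList.map (fun c => (c.toNat : Int))

-- inner `while j > 0 and value < scores[j]: j -= 1`; scores[j] is always in range, so getD is exact.
def findJ (scores : List (List Int)) (value : List Int) : Nat → Nat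
  | 0 => 0
  | j + 1 => if tupLt value (scores.getD (j + 1) []) then findJ scores value j else j + 1

-- outer `while i < len(scores) - 1` loop; i increases each iteration and len(scores) is constant,
-- so fuel = len(scores) suffices (proved implicitly by the equivalence proof). pop/insert on
-- in-range non-negative indices are eraseIdx/insertIdx; indexing is in range, so getD is exact.
def loopA : Nat → List (List Int) → Nat → Int → Int
  | 0, _, _, n => n
  | fuel + 1, scores, i, n =>
    if i + 1 < scores.length then
      if tupLt (scores.getD (i + 1) []) (scores.getD i []) then
        let value := scores.getD (i + 1) []
        let j0 := findJ scores value i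
        let j := if tupLt (scores.getD j0 []) value then j0 + 1 else j0
        loopA fuel (((scores.eraseIdx (i + 1)).insertIdx j value)) (i + 1) (n + 1)
      else loopA fuel scores (i + 1) n
    else n

def solve (cards : List String) : Int :=
  let scores := cards.foldl (fun acc card => acc ++ [ordTuple card]) []
  loopA scores.length scores 0 0

-- ===== PORT B =====
-- Python string comparison `card >= mx` is codepoint-lexicographic = ¬ tupLt on the codepoint lists; exact.
def stepB (st : Option String × Int) (card : String) : Option String × Int :=
  match st with
  | (none, n) => (some card, n)
  | (some m, n) => if tupLt (ordTuple card) (ordTuple m) = false then (some card, n) else (some m, n + 1)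

def solve_alt (cards : List String) : Int :=
  (cards.foldl stepB (none, 0)).2

-- ===== PRECONDITION & SPEC =====
def Spec_solve (cards : List String) (out : Int) : Prop := out = solve_alt cards
instance (cards : List String) (out : Int) : Decidable (Spec_solve cards out) := by unfold Spec_solve; infer_instance

-- ===== CLAIM (what is proved, stated in full; the proofs are below) =====
def Claim_equal_solve : Prop := ∀ (cards : List String), Dom_solve cards → Spec_solve cards (solve cards)

-- ===== LEMMAS AND PROOFS =====

-- running-max count, expressed on the codepoint tuples
def cnt (m : List Int) : List (List Int) → Int
  | [] => 0
  | x :: xs => if tupLt x m then 1 + cnt m xs else cnt x xs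

lemma tupLt_asymm : ∀ a b : List Int, tupLt a b = true → tupLt b a = false := by
  intro a
  induction a with
  | nil =>
    intro b h
    cases b with
    | nil => simp [tupLt] at h
    | cons y ys => simp [tupLt]
  | cons x xs ih =>
    intro b h
    cases b with
    | nil => simp [tupLt] at h
    | cons y ys =>
      by_cases h1 : x < y
      · have h2 : ¬ y < x := by omega
        simp [tupLt, h1, h2]
      · by_cases h2 : y < x
        · simp [tupLt, h1, h2] at h
        · simp [tupLt, h1, h2] at h ⊢
          exact ih ys h

lemma findJ_le (s : List (List Int)) (v : List Int) : ∀ j, findJ s v j ≤ j := by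
  intro j
  induction j with
  | zero => simp [findJ]
  | succ k ih =>
    simp only [findJ]
    split
    · omega
    · omega

lemma erase_app {α : Type} (sp : List α) (x : α) (rs : List α) :
    (sp ++ x :: rs).eraseIdx sp.length = sp ++ rs := by
  induction sp with
  | nil => simp
  | cons a l ih => simpa using ih

lemma insert_app {α : Type} : ∀ (sp rs : List α) (j : Nat) (x : α), j ≤ sp.length →
    (sp ++ rs).insertIdx j x = sp.insertIdx j x ++ rs := by
  intro sp
  induction sp with
  | nil =>
    intro rs j x hj
    have hz : j = 0 := by simpa using hj
    subst hz
    simp [List.insertIdx]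
  | cons a l ih =>
    intro rs j x hj
    cases j with
    | zero => simp [List.insertIdx]
    | succ k =>
      simp only [List.cons_append, List.insertIdx_succ_cons]
      rw [ih rs k x (by simpa using hj)]

lemma getLastD_insert {α : Type} : ∀ (sp : List α) (j : Nat) (x d : α), j < sp.length →
    (sp.insertIdx j x).getLastD d = sp.getLastD d := by
  intro sp
  induction sp with
  | nil => intro j x d hj; simp at hj
  | cons a l ih =>
    intro j x d hj
    cases j with
    | zero =>
      cases l with
      | nil => simp [List.insertIdx]
      | cons b t => simp [List.insertIdx]
    | succ k =>
      have hk : k < l.length := by simpa using hj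
      have hne : l.insertIdx k x ≠ [] := by
        have : (l.insertIdx k x).length = l.length + 1 := by
          simp [List.length_insertIdx, Nat.le_of_lt hk]
        intro hnil; rw [hnil] at this; simp at this
      simp only [List.insertIdx_succ_cons, List.getLastD_cons]
      exact ih k x a hk

lemma getD_last {α : Type} : ∀ (sp : List α) (i : Nat) (d : α), sp.length = i + 1 →
    sp.getD i d = sp.getLastD d := by
  intro sp i d h
  have hi : i = sp.length - 1 := by omega
  subst hi
  simp [List.getD_eq_getElem?_getD, List.getLastD_eq_getLast?, List.getLast?_eq_getElem?]

lemma build_eq : ∀ (cards : List String) (acc : List (List Int)),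
    cards.foldl (fun acc card => acc ++ [ordTuple card]) acc = acc ++ cards.map ordTuple := by
  intro cards
  induction cards with
  | nil => simp
  | cons c cs ih => intro acc; simp [List.foldl, ih]

lemma loopA_eq : ∀ (rest sp : List (List Int)) (i : Nat) (n : Int) (fuel : Nat),
    sp.length = i + 1 → rest.length + 1 ≤ fuel →
    loopA fuel (sp ++ rest) i n = n + cnt (sp.getLastD []) rest := by
  intro rest
  induction rest with
  | nil =>
    intro sp i n fuel hl hf
    obtain ⟨f, rfl⟩ : ∃ f, fuel = f + 1 := ⟨fuel - 1, by omega⟩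
    simp [loopA, cnt, hl]
  | cons x rs ih =>
    intro sp i n fuel hl hf
    obtain ⟨f, rfl⟩ : ∃ f, fuel = f + 1 := ⟨fuel - 1, by omega⟩
    have hlen : (sp ++ x :: rs).length = i + 1 + (rs.length + 1) := by simp [hl]
    have hcond : i + 1 < (sp ++ x :: rs).length := by omega
    have hx : (sp ++ x :: rs).getD (i + 1) [] = x := by
      rw [List.getD_append_right _ _ _ _ (by omega)]
      simp [hl]
    have hm : (sp ++ x :: rs).getD i [] = sp.getLastD [] := by
      rw [List.getD_append _ _ _ _ (by omega)]
      exact getD_last sp i [] hl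
    simp only [loopA, if_pos hcond, hx, hm]
    by_cases hlt : tupLt x (sp.getLastD []) = true
    · rw [if_pos hlt]
      -- the computed insertion position is ≤ i
      have hj : (if tupLt ((sp ++ x :: rs).getD (findJ (sp ++ x :: rs) x i) []) x
                 then findJ (sp ++ x :: rs) x i + 1 else findJ (sp ++ x :: rs) x i) ≤ i := by
        cases i with
        | zero =>
          have h0 : findJ (sp ++ x :: rs) x 0 = 0 := by simp [findJ]
          have hg0 : (sp ++ x :: rs).getD 0 [] = sp.getLastD [] := by
            rw [List.getD_append _ _ _ _ (by omega)]
            exact getD_last sp 0 [] hl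
          rw [h0, hg0, tupLt_asymm _ _ hlt]
          simp
        | succ k =>
          have hstep : findJ (sp ++ x :: rs) x (k + 1) = findJ (sp ++ x :: rs) x k := by
            simp only [findJ]
            rw [hm, if_pos hlt]
          have hle : findJ (sp ++ x :: rs) x k ≤ k := findJ_le _ _ k
          rw [hstep]
          split <;> omega
      set j := (if tupLt ((sp ++ x :: rs).getD (findJ (sp ++ x :: rs) x i) []) x
                then findJ (sp ++ x :: rs) x i + 1 else findJ (sp ++ x :: rs) x i) with hjdef
      have herase : (sp ++ x :: rs).eraseIdx (i + 1) = sp ++ rs := by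
        rw [← hl]; exact erase_app sp x rs
      have hins : (sp ++ rs).insertIdx j x = sp.insertIdx j x ++ rs :=
        insert_app sp rs j x (by omega)
      rw [herase, hins]
      have hjle : j ≤ sp.length := by omega
      have hlen' : (sp.insertIdx j x).length = (i + 1) + 1 := by
        rw [List.length_insertIdx, if_pos hjle]
        omega
      rw [ih (sp.insertIdx j x) (i + 1) (n + 1) f hlen' (by simpa using Nat.le_of_succ_le_succ hf)]
      rw [getLastD_insert sp j x [] (by omega)]
      simp only [cnt, if_pos hlt]
      ring
    · rw [if_neg hlt]
      have hre : sp ++ x :: rs = (sp ++ [x]) ++ rs := by simp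
      rw [hre]
      have hlast : (sp ++ [x]).getLastD [] = x := by
        simp [List.getLastD_eq_getLast?]
      rw [ih (sp ++ [x]) (i + 1) n f (by simp [hl]) (by simpa using Nat.le_of_succ_le_succ hf)]
      rw [hlast]
      simp only [cnt]
      rw [if_neg hlt]

lemma foldB_eq : ∀ (cs : List String) (m : String) (n : Int),
    (cs.foldl stepB (some m, n)).2 = n + cnt (ordTuple m) (cs.map ordTuple) := by
  intro cs
  induction cs with
  | nil => intro m n; simp [cnt]
  | cons c cs ih =>
    intro m n
    by_cases h : tupLt (ordTuple c) (ordTuple m) = true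
    · have : stepB (some m, n) c = (some m, n + 1) := by simp [stepB, h]
      simp only [List.foldl, this, ih]
      simp only [List.map, cnt, if_pos h]
      ring
    · have : stepB (some m, n) c = (some c, n) := by
        simp [stepB, eq_false_of_ne_true h]
      simp only [List.foldl, this, ih]
      simp only [List.map, cnt]
      rw [if_neg h]

-- ===== VERDICT (by name: the statement is the Claim_ definition above) =====
theorem solve_spec : Claim_equal_solve := by
  unfold Claim_equal_solve
  intro cards _
  unfold Spec_solve
  cases cards with
  | nil => rfl
  | cons c cs =>
    show solve (c :: cs) = solve_alt (c :: cs)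
    unfold solve solve_alt
    rw [build_eq (c :: cs) []]
    simp only [List.nil_append, List.map]
    have h1 : ordTuple c :: cs.map ordTuple = [ordTuple c] ++ cs.map ordTuple := rfl
    have hlen : (ordTuple c :: cs.map ordTuple).length = cs.length + 1 := by simp
    rw [hlen, h1,
      loopA_eq (cs.map ordTuple) [ordTuple c] 0 0 (cs.length + 1) (by simp) (by simp)]
    have h2 : (c :: cs).foldl stepB (none, 0) = cs.foldl stepB (some c, 0) := rfl
    rw [h2, foldB_eq cs c 0]
    simp [List.getLastD]
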